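-- pv_equiv track=rewrite | github.com/tonglinyan/identification_context | pipeline/utils.py | extract_table_answers_with_keys
-- ===== SOURCE A (Python) =====
-- from typing import Dict, List, Optional, Tuple
--
-- def extract_table_answers_with_keys(
--     text: str
-- ) -> List[str]:
--
--     asws = []
--
--     asw_toks = []
--     for tok in text.split():
--         asw_toks.append(tok)
--
--         if tok == ']':
--             asws.append(' '.join(asw_toks).strip())
--             asw_toks = []
--
--     return asws
-- ===== SOURCE B (Python) =====
-- def extract_table_answers_with_keys(text):
--     # Two-pass decomposition: find the ']' boundary indices first, then slice.
--     tokens = text.split()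
--     bounds = [i for i, tok in enumerate(tokens) if tok == ']']
--     answers = []
--     start = 0
--     for b in bounds:
--         answers.append(' '.join(tokens[start:b + 1]))
--         start = b + 1
--     return answers
-- ===== Notes on version B (the rewrite author's own statement) =====
-- stated objective: alternative
-- what changed: Replaces A's single flush-on-']' pass with a running token accumulator (plus a redundant strip) by a two-pass index-then-slice decomposition: first collect the indices of ']' tokens, then emit ' '.join of each slice between consecutive boundaries.
import Mathlib
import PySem

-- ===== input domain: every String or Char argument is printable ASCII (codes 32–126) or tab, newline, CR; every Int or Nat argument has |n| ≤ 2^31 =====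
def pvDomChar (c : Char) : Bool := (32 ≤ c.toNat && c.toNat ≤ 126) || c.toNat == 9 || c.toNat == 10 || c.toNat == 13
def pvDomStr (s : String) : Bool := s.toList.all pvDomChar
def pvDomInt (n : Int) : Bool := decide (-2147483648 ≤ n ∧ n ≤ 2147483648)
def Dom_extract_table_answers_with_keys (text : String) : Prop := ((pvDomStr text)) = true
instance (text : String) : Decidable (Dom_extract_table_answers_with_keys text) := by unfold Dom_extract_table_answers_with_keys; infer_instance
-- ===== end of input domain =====

-- B replaces A's flush-on-']' accumulator pass by a two-pass index-then-slice decomposition; same results.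

-- ===== PORT A =====
def extract_table_answers_with_keys (text : String) : List String :=
  let r := (PySem.Str.split₀ text).foldl
    (fun (st : List String × List String) tok =>
      let asw_toks := st.2 ++ [tok]
      if tok == "]" then
        (st.1 ++ [PySem.Str.strip (PySem.Str.join " " asw_toks)], ([] : List String))
      else (st.1, asw_toks))
    (([] : List String), ([] : List String))
  r.1

-- ===== PORT B =====
def extract_table_answers_with_keys_alt (text : String) : List String :=
  let tokens := PySem.Str.split₀ text
  let bounds := ((PySem.List.enumerate tokens).filter (fun p => p.2 == "]")).map (fun p => p.1)
  let r := bounds.foldl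
    (fun (st : Int × List String) b =>
      (b + 1, st.2 ++ [PySem.Str.join " " (PySem.List.slice tokens (some st.1) (some (b + 1)))]))
    ((0 : Int), ([] : List String))
  r.2

-- ===== PRECONDITION & SPEC =====
def Spec_extract_table_answers_with_keys (text : String) (out : List String) : Prop := out = extract_table_answers_with_keys_alt text
instance (text : String) (out : List String) : Decidable (Spec_extract_table_answers_with_keys text out) := by unfold Spec_extract_table_answers_with_keys; infer_instance

-- ===== CLAIM (what is proved, stated in full; the proofs are below) =====
def Claim_equal_extract_table_answers_with_keys : Prop := ∀ (text : String), Dom_extract_table_answers_with_keys text → Spec_extract_table_answers_with_keys text (extract_table_answers_with_keys text)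

-- ===== LEMMAS AND PROOFS =====

-- a token is "clean": nonempty and free of whitespace (what `str.split()` guarantees)
def pvClean (w : List Char) : Prop := w ≠ [] ∧ w.all (fun c => !PySem.Chars.isspace c)

theorem pv_go_clean (cs : List Char) : ∀ (cur : List Char) (acc : List (List Char)),
    (∀ w ∈ acc, pvClean w) → cur.all (fun c => !PySem.Chars.isspace c) →
    ∀ w ∈ PySem.Chars.split₀.go cs cur acc, pvClean w := by
  induction cs with
  | nil =>
    intro cur acc hacc hcur w hw
    simp only [PySem.Chars.split₀.go] at hw
    split at hw
    · exact hacc _ (List.mem_reverse.mp hw)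
    · rcases List.mem_cons.mp (List.mem_reverse.mp hw) with h | h
      · subst h
        refine ⟨by simpa using ‹¬ cur.isEmpty = true›, by simpa using hcur⟩
      · exact hacc _ h
  | cons c rest ih =>
    intro cur acc hacc hcur w hw
    simp only [PySem.Chars.split₀.go] at hw
    split at hw
    · split at hw
      · exact ih [] acc hacc (by simp) w hw
      · refine ih [] (cur.reverse :: acc) ?_ (by simp) w hw
        intro v hv
        rcases List.mem_cons.mp hv with hv | hv
        · subst hv
          exact ⟨by simpa using ‹¬ cur.isEmpty = true›, by simpa using hcur⟩
        · exact hacc _ hv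
    · have hc : PySem.Chars.isspace c = false := by simpa using ‹¬ PySem.Chars.isspace c = true›
      exact ih (c :: cur) acc hacc (by simp [hc, hcur]) w hw

theorem pv_tokens_clean (text : String) : ∀ w ∈ PySem.Str.split₀ text, pvClean w.toList := by
  intro w hw
  have : w.toList ∈ PySem.Chars.split₀ text.toList := by
    rw [← PySem.Str.split₀_map_toList]
    exact List.mem_map_of_mem hw
  exact pv_go_clean _ [] [] (by simp) (by simp) _ this

theorem pv_lstrip_clean (w r : List Char) (h : pvClean w) :
    PySem.Chars.lstrip (w ++ r) = w ++ r := by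
  obtain ⟨hne, hns⟩ := h
  cases w with
  | nil => exact absurd rfl hne
  | cons c t =>
    have : PySem.Chars.isspace c = false := by simpa using List.all_eq_true.mp hns c (by simp)
    simp [PySem.Chars.lstrip, this]

theorem pv_rev_join_clean (ws : List (List Char)) (hne : ws ≠ [])
    (h : ∀ w ∈ ws, pvClean w) :
    ∃ d X, (PySem.Chars.join [' '] ws).reverse = d :: X ∧ PySem.Chars.isspace d = false := by
  induction ws with
  | nil => exact absurd rfl hne
  | cons w ws ih =>
    cases ws with
    | nil =>
      obtain ⟨hwne, hwns⟩ := h w (by simp)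
      rw [PySem.Chars.join_singleton]
      obtain ⟨d, X, hdx⟩ : ∃ d X, w.reverse = d :: X := by
        cases hrev : w.reverse with
        | nil => exact absurd (by simpa using hrev) hwne
        | cons d X => exact ⟨d, X, rfl⟩
      refine ⟨d, X, hdx, ?_⟩
      have hd : d ∈ w := by
        have : d ∈ w.reverse := by simp [hdx]
        simpa using this
      simpa using List.all_eq_true.mp hwns d hd
    | cons w' ws' =>
      obtain ⟨d, X, hdx, hd⟩ := ih (by simp) (fun v hv => h v (by simp [hv]))
      refine ⟨d, X ++ [' '] ++ w.reverse, ?_, hd⟩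
      rw [PySem.Chars.join_cons_cons]
      simp [List.reverse_append, hdx]

theorem pv_strip_clean (ws : List (List Char)) (hne : ws ≠ [])
    (h : ∀ w ∈ ws, pvClean w) :
    PySem.Chars.strip (PySem.Chars.join [' '] ws) = PySem.Chars.join [' '] ws := by
  have hl : PySem.Chars.lstrip (PySem.Chars.join [' '] ws) = PySem.Chars.join [' '] ws := by
    cases ws with
    | nil => exact absurd rfl hne
    | cons w ws =>
      cases ws with
      | nil => rw [PySem.Chars.join_singleton]; simpa using pv_lstrip_clean w [] (h w (by simp))
      | cons w' ws' =>
        rw [PySem.Chars.join_cons_cons, List.append_assoc]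
        exact pv_lstrip_clean w _ (h w (by simp))
  obtain ⟨d, X, hdx, hd⟩ := pv_rev_join_clean ws hne h
  unfold PySem.Chars.strip
  rw [hl]
  unfold PySem.Chars.rstrip
  rw [hdx]
  simp [List.dropWhile, hd, ← hdx]

-- strip is the identity on a " "-join of clean tokens (String level)
theorem pv_strip_join (l : List String) (hne : l ≠ [])
    (h : ∀ w ∈ l, pvClean w.toList) :
    PySem.Str.strip (PySem.Str.join " " l) = PySem.Str.join " " l := by
  apply String.toList_inj.mp
  rw [PySem.Str.toList_strip, PySem.Str.toList_join]
  have hsep : (" " : String).toList = [' '] := rfl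
  rw [hsep]
  exact pv_strip_clean _ (by simpa using hne) (by intro w hw; obtain ⟨v, hv, rfl⟩ := List.mem_map.mp hw; exact h v hv)

-- shared recursive shape: group tokens flushing at "]" (no strip)
def pvGrp (cur : List String) : List String → List String
  | [] => []
  | t :: ts =>
    if t == "]" then PySem.Str.join " " (cur ++ [t]) :: pvGrp [] ts
    else pvGrp (cur ++ [t]) ts

-- A's fold equals pvGrp (strip eliminated by cleanliness)
theorem pv_foldA (ts : List String) : ∀ (acc cur : List String),
    (∀ w ∈ cur, pvClean w.toList) → (∀ w ∈ ts, pvClean w.toList) →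
    (ts.foldl
      (fun (st : List String × List String) tok =>
        let asw_toks := st.2 ++ [tok]
        if tok == "]" then
          (st.1 ++ [PySem.Str.strip (PySem.Str.join " " asw_toks)], ([] : List String))
        else (st.1, asw_toks)) (acc, cur)).1 = acc ++ pvGrp cur ts := by
  induction ts with
  | nil => intro acc cur _ _; simp [pvGrp]
  | cons thead rest ih =>
    intro acc cur hcur hts
    have htail : ∀ w ∈ rest, pvClean w.toList := fun w hw => hts w (by simp [hw])
    have hcons : ∀ w ∈ cur ++ [thead], pvClean w.toList := by
      intro w hw
      rcases List.mem_append.mp hw with h | h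
      · exact hcur w h
      · simp at h; rw [h]; exact hts thead (by simp)
    rw [List.foldl_cons]
    by_cases ht : (thead == "]") = true
    · have hstrip : PySem.Str.strip (PySem.Str.join " " (cur ++ [thead])) = PySem.Str.join " " (cur ++ [thead]) :=
        pv_strip_join _ (by simp) hcons
      simp only [ht, if_pos]
      rw [ih _ [] (by simp) htail]
      simp [pvGrp, ht, hstrip]
    · simp only [ht, Bool.false_eq_true, if_false]
      rw [ih _ (cur ++ [thead]) hcons htail]
      simp [pvGrp, ht]

-- B's fold over the boundary indices of the remaining tokens equals pvGrp of the pending slice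
theorem pv_foldB (L : List String) (ts : List String) : ∀ (j s : Nat) (o : List String),
    L.drop j = ts → s ≤ j →
    ((((PySem.List.enumerate ts (j : Int)).filter (fun p => p.2 == "]")).map (fun p => p.1)).foldl
      (fun (st : Int × List String) b =>
        (b + 1, st.2 ++ [PySem.Str.join " " (PySem.List.slice L (some st.1) (some (b + 1)))]))
      (((s : Nat) : Int), o)).2
    = o ++ pvGrp ((L.drop s).take (j - s)) ts := by
  induction ts with
  | nil => intro j s o _ _; simp [PySem.List.enumerate, pvGrp]
  | cons t ts ih =>
    intro j s o hdrop hsle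
    have hslice : (L.drop s).take (j + 1 - s) = (L.drop s).take (j - s) ++ [t] := by
      have h1 : j + 1 - s = (j - s) + 1 := by omega
      rw [h1, List.take_add]
      congr 1
      have h2 : (L.drop s).drop (j - s) = L.drop j := by
        rw [List.drop_drop]; congr 1; omega
      rw [h2, hdrop]
      simp
    have hdropsucc : L.drop (j + 1) = ts := by
      have : (L.drop j).drop 1 = L.drop (j + 1) := by rw [List.drop_drop]
      rw [← this, hdrop]
      simp
    have hcast : ((j : Int)) + 1 = (((j + 1 : Nat)) : Int) := by push_cast; ring
    rw [PySem.List.enumerate_cons]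
    by_cases ht : (t == "]") = true
    · rw [List.filter_cons_of_pos (by simpa using ht), List.map_cons, List.foldl_cons]
      have hs : PySem.List.slice L (some ((s : Nat) : Int)) (some ((j : Int) + 1)) = (L.drop s).take (j + 1 - s) := by
        rw [hcast, PySem.List.slice_natCast]
      rw [hcast] at hs
      rw [hcast, ih (j + 1) (j + 1) _ hdropsucc (le_refl _)]
      simp [pvGrp, ht]
      rw [hcast, hs, hslice]
    · rw [List.filter_cons_of_neg (by simpa using ht), hcast]
      rw [ih (j + 1) s o hdropsucc (by omega)]
      rw [hslice]
      simp [pvGrp, ht]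

-- ===== VERDICT (by name: the statement is the Claim_ definition above) =====
theorem extract_table_answers_with_keys_spec : Claim_equal_extract_table_answers_with_keys := by
  intro text _
  unfold Spec_extract_table_answers_with_keys extract_table_answers_with_keys extract_table_answers_with_keys_alt
  simp only []
  rw [pv_foldA (PySem.Str.split₀ text) [] [] (by simp) (pv_tokens_clean text)]
  have := pv_foldB (PySem.Str.split₀ text) (PySem.Str.split₀ text) 0 0 [] (by simp) (le_refl 0)
  simp only [Nat.cast_zero, Nat.sub_zero, List.drop_zero, List.take_zero, List.nil_append] at this
  simpa using this.symm
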